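-- pv_equiv track=rewrite | github.com/andythenorth/iron-horse | src/utils.py | unescape_chameleon_output
-- ===== SOURCE A (Python) =====
-- def unescape_chameleon_output(escaped_nml):
--     # first drop as much whitespace as we sensibly can
--     # in tests, this doesn't make the compile any faster at all, but it reduced firs.nml (v3.0.4) from 326k lines to 226k lines,
--     escaped_nml = "\n".join(
--         [x for x in escaped_nml.split("\n") if x.strip(" \t\n\r") != ""]
--     )
--     # chameleon html-escapes some characters; that's sane and secure for chameleon's intended web use, but not wanted for nml
--     # there is probably a standard module for unescaping html entities, but this will do for now
--     escaped_nml = ">".join(escaped_nml.split("&gt;"))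
--     escaped_nml = "<".join(escaped_nml.split("&lt;"))
--     escaped_nml = "&".join(escaped_nml.split("&amp;"))
--     return escaped_nml
-- ===== SOURCE B (Python) =====
-- def unescape_chameleon_output(escaped_nml):
--     # one pass: skip all-whitespace lines and unescape each kept line with a single left-to-right scan
--     out = []
--     for line in escaped_nml.split("\n"):
--         if all(ch in " \t\n\r" for ch in line):
--             continue
--         buf = []
--         i = 0
--         n = len(line)
--         while i < n:
--             if line.startswith("&gt;", i):
--                 buf.append(">")
--                 i += 4
--             elif line.startswith("&lt;", i):
--                 buf.append("<")
--                 i += 4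
--             elif line.startswith("&amp;", i):
--                 buf.append("&")
--                 i += 5
--             else:
--                 buf.append(line[i])
--                 i += 1
--         out.append("".join(buf))
--     return "\n".join(out)
-- ===== Notes on version B (the rewrite author's own statement) =====
-- stated objective: alternative
-- what changed: Replaces the three sequential whole-string split/join unescaping passes (after a separate blank-line filter) with one fused loop over lines that skips all-whitespace lines and unescapes each kept line in a single left-to-right scan matching &gt;/&lt;/&amp; in place.
import Mathlib
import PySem

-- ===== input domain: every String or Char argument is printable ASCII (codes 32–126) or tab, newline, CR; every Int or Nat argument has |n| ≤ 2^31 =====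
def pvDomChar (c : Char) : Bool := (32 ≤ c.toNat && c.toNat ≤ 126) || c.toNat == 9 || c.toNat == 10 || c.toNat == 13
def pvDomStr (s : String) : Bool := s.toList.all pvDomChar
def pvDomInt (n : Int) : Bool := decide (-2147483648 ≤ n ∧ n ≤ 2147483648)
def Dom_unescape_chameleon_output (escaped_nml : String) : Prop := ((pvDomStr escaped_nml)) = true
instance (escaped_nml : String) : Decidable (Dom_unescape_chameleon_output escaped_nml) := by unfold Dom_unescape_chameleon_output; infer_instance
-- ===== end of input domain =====

-- B fuses A's three sequential whole-string split/join unescape passes and its separate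
-- blank-line filter into one loop over lines with a single left-to-right scan per kept line
-- (objective: alternative decomposition, same O(n) cost).

-- ===== PORT A =====
def unescape_chameleon_output (escaped_nml : String) : String :=
  -- "\n".join([x for x in escaped_nml.split("\n") if x.strip(" \t\n\r") != ""])
  let s1 := PySem.Chars.join ['\n']
    ((PySem.Chars.splitOn escaped_nml.toList ['\n']).filter
      (fun x => !(PySem.Chars.stripChars x [' ', '\t', '\n', '\r']).isEmpty))
  -- ">".join(….split("&gt;")) ; "<".join(….split("&lt;")) ; "&".join(….split("&amp;"))
  let s2 := PySem.Chars.join ['>'] (PySem.Chars.splitOn s1 ['&', 'g', 't', ';'])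
  let s3 := PySem.Chars.join ['<'] (PySem.Chars.splitOn s2 ['&', 'l', 't', ';'])
  let s4 := PySem.Chars.join ['&'] (PySem.Chars.splitOn s3 ['&', 'a', 'm', 'p', ';'])
  String.ofList s4

-- ===== PORT B =====
-- the single left-to-right scan over one line (B's inner while loop)
def pvScan : List Char → List Char
  | [] => []
  | c :: t =>
    if ['&', 'g', 't', ';'].isPrefixOf (c :: t) then '>' :: pvScan ((c :: t).drop 4)
    else if ['&', 'l', 't', ';'].isPrefixOf (c :: t) then '<' :: pvScan ((c :: t).drop 4)
    else if ['&', 'a', 'm', 'p', ';'].isPrefixOf (c :: t) then '&' :: pvScan ((c :: t).drop 5)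
    else c :: pvScan t
  termination_by l => l.length
  decreasing_by all_goals simp [List.length_drop]

def unescape_chameleon_output_alt (escaped_nml : String) : String :=
  String.ofList (PySem.Chars.join ['\n']
    (((PySem.Chars.splitOn escaped_nml.toList ['\n']).filter
        (fun line => line.any (fun ch => !([' ', '\t', '\n', '\r'].contains ch)))).map pvScan))

-- ===== PRECONDITION & SPEC =====
def Spec_unescape_chameleon_output (escaped_nml : String) (out : String) : Prop := out = unescape_chameleon_output_alt escaped_nml
instance (escaped_nml : String) (out : String) : Decidable (Spec_unescape_chameleon_output escaped_nml out) := by unfold Spec_unescape_chameleon_output; infer_instance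

-- ===== CLAIM (what is proved, stated in full; the proofs are below) =====
def Claim_equal_unescape_chameleon_output : Prop := ∀ (escaped_nml : String), Dom_unescape_chameleon_output escaped_nml → Spec_unescape_chameleon_output escaped_nml (unescape_chameleon_output escaped_nml)

-- ===== LEMMAS AND PROOFS =====

-- "replace pattern (q::qs) by the single char r", accumulator-free: the common form
-- both A's join∘splitOn passes and B's scan are reduced to.
def pvRl (q : Char) (qs : List Char) (r : Char) : List Char → List Char
  | [] => []
  | c :: t =>
    if (q :: qs).isPrefixOf (c :: t) then r :: pvRl q qs r ((c :: t).drop (qs.length + 1))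
    else c :: pvRl q qs r t
  termination_by l => l.length
  decreasing_by all_goals simp [List.length_drop]

-- accumulator-free splitter matching PySem.Chars.splitOn
def pvMerge (pre : List Char) : List (List Char) → List (List Char)
  | [] => [pre]
  | x :: xs => (pre ++ x) :: xs

def pvSplit' (q : Char) (qs : List Char) : List Char → List (List Char)
  | [] => [[]]
  | c :: t =>
    if (q :: qs).isPrefixOf (c :: t) then [] :: pvSplit' q qs ((c :: t).drop (qs.length + 1))
    else pvMerge [c] (pvSplit' q qs t)
  termination_by l => l.length
  decreasing_by all_goals simp [List.length_drop]

theorem pvSplit'_ne_nil (q : Char) (qs l : List Char) : pvSplit' q qs l ≠ [] := by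
  unfold pvSplit'
  split
  · simp
  · split
    · simp
    · unfold pvMerge
      split <;> simp

theorem pvMerge_append (a b : List Char) (s : List (List Char)) :
    pvMerge (a ++ b) s = pvMerge a (pvMerge b s) := by
  cases s <;> simp [pvMerge]

theorem pvMerge_nil {s : List (List Char)} (h : s ≠ []) : pvMerge [] s = s := by
  cases s with
  | nil => exact absurd rfl h
  | cons x xs => simp [pvMerge]

theorem go_spec (q : Char) (qs : List Char) : ∀ (fuel : Nat) (l cur : List Char) (acc : List (List Char)),
    l.length < fuel →
    PySem.Chars.splitOn.go (q :: qs) fuel l cur acc = acc.reverse ++ pvMerge cur.reverse (pvSplit' q qs l) := by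
  intro fuel
  induction fuel with
  | zero => intro l cur acc h; omega
  | succ f ih =>
    intro l cur acc h
    cases l with
    | nil =>
      rw [PySem.Chars.splitOn.go]
      · simp [pvSplit', pvMerge]
      · omega
    | cons c t =>
      rw [PySem.Chars.splitOn.go]
      by_cases hp : (q :: qs).isPrefixOf (c :: t)
      · simp only [hp, if_true]
        rw [ih]
        · rw [pvSplit']
          simp only [hp, if_true, List.length_cons, List.reverse_cons]
          rw [List.reverse_nil, pvMerge_nil (pvSplit'_ne_nil _ _ _)]
          simp [pvMerge]
        · simp only [List.length_drop, List.length_cons] at *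
          omega
      · rw [if_neg hp]
        rw [ih t (c :: cur) acc (by simp at h ⊢; omega)]
        conv_rhs => rw [pvSplit']
        rw [if_neg hp]
        simp only [List.reverse_cons, pvMerge_append]

theorem splitOn_eq_split' (q : Char) (qs l : List Char) :
    PySem.Chars.splitOn l (q :: qs) = pvSplit' q qs l := by
  unfold PySem.Chars.splitOn
  rw [go_spec q qs (l.length + 1) l [] [] (by omega)]
  simp [pvMerge_nil (pvSplit'_ne_nil _ _ _)]

theorem join_merge (sep a : List Char) (x : List Char) (xs : List (List Char)) :
    PySem.Chars.join sep (pvMerge a (x :: xs)) = a ++ PySem.Chars.join sep (x :: xs) := by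
  cases xs with
  | nil => simp [pvMerge, PySem.Chars.join_singleton]
  | cons y ys => simp [pvMerge, PySem.Chars.join_cons_cons]

theorem join_split'_eq_rl (q r : Char) (qs : List Char) : ∀ (l : List Char),
    PySem.Chars.join [r] (pvSplit' q qs l) = pvRl q qs r l := by
  intro l
  fun_induction pvSplit' q qs l with
  | case1 => simp [PySem.Chars.join_singleton, pvRl]
  | case2 c t hp ih =>
    rw [pvRl, if_pos hp]
    obtain ⟨x, xs, hx⟩ : ∃ x xs, pvSplit' q qs ((c :: t).drop (qs.length + 1)) = x :: xs := by
      cases hs : pvSplit' q qs ((c :: t).drop (qs.length + 1)) with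
      | nil => exact absurd hs (pvSplit'_ne_nil _ _ _)
      | cons x xs => exact ⟨x, xs, rfl⟩
    rw [hx] at ih ⊢
    rw [PySem.Chars.join_cons_cons, ← ih]
    simp
  | case3 c t hp ih =>
    rw [pvRl, if_neg hp]
    obtain ⟨x, xs, hx⟩ : ∃ x xs, pvSplit' q qs t = x :: xs := by
      cases hs : pvSplit' q qs t with
      | nil => exact absurd hs (pvSplit'_ne_nil _ _ _)
      | cons x xs => exact ⟨x, xs, rfl⟩
    rw [hx] at ih ⊢
    rw [join_merge, ← ih]
    simp

theorem join_splitOn_eq_rl (q r : Char) (qs l : List Char) :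
    PySem.Chars.join [r] (PySem.Chars.splitOn l (q :: qs)) = pvRl q qs r l := by
  rw [splitOn_eq_split', join_split'_eq_rl]

-- pass-through inversion: a pvRl output starting with a char ≠ the replacement char
-- comes from an input starting with that char
theorem pvRl_cons_inv (q : Char) (qs : List Char) (r c : Char) {l rest : List Char}
    (hc : c ≠ r) (h : pvRl q qs r l = c :: rest) :
    ∃ t, l = c :: t ∧ rest = pvRl q qs r t := by
  cases l with
  | nil => simp [pvRl] at h
  | cons d t =>
    rw [pvRl] at h
    by_cases hp : (q :: qs).isPrefixOf (d :: t)
    · rw [if_pos hp] at h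
      injection h with h1 h2
      exact absurd h1.symm hc
    · rw [if_neg hp] at h
      injection h with h1 h2
      exact ⟨t, by rw [h1], h2.symm⟩

-- step equations for pvRl
theorem pvRl_no {q : Char} {qs : List Char} (r : Char) {c : Char} {t : List Char}
    (hp : (q :: qs).isPrefixOf (c :: t) = false) :
    pvRl q qs r (c :: t) = c :: pvRl q qs r t := by
  rw [pvRl, if_neg (by simp [hp])]

theorem pvRl_yes {q : Char} {qs : List Char} (r : Char) {c : Char} {t : List Char}
    (hp : (q :: qs).isPrefixOf (c :: t) = true) :
    pvRl q qs r (c :: t) = r :: pvRl q qs r ((c :: t).drop (qs.length + 1)) := by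
  rw [pvRl, if_pos hp]

-- inversion through the first two replaces at once
theorem pvRl2_cons_inv (c : Char) {l rest : List Char} (h1 : c ≠ '<') (h2 : c ≠ '>')
    (h : pvRl '&' ['l', 't', ';'] '<' (pvRl '&' ['g', 't', ';'] '>' l) = c :: rest) :
    ∃ t, l = c :: t ∧ rest = pvRl '&' ['l', 't', ';'] '<' (pvRl '&' ['g', 't', ';'] '>' t) := by
  obtain ⟨u, hu, hr⟩ := pvRl_cons_inv _ _ _ _ h1 h
  obtain ⟨t, ht, hr2⟩ := pvRl_cons_inv _ _ _ _ h2 hu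
  exact ⟨t, ht, by rw [hr, hr2]⟩

-- if '&lt;' does not start c::t, it does not start the image of c::t under the first replace
theorem no_lt (c : Char) (t : List Char)
    (h2 : (['&', 'l', 't', ';'] : List Char).isPrefixOf (c :: t) = false) :
    (['&', 'l', 't', ';'] : List Char).isPrefixOf (c :: pvRl '&' ['g', 't', ';'] '>' t) = false := by
  by_contra hne
  rw [Bool.not_eq_false, List.isPrefixOf_iff_prefix, List.cons_prefix_iff] at hne
  obtain ⟨l1, he1, hp1⟩ := hne
  injection he1 with hc he1'
  subst he1'
  obtain ⟨l2, he2, hp2⟩ := List.cons_prefix_iff.mp hp1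
  obtain ⟨t1, ht1, hr1⟩ := pvRl_cons_inv _ _ _ _ (by decide) he2
  obtain ⟨l3, he3, hp3⟩ := List.cons_prefix_iff.mp hp2
  obtain ⟨t2, ht2, hr2⟩ := pvRl_cons_inv _ _ _ _ (by decide) (hr1.symm.trans he3)
  obtain ⟨l4, he4, _⟩ := List.cons_prefix_iff.mp hp3
  obtain ⟨t3, ht3, _⟩ := pvRl_cons_inv _ _ _ _ (by decide) (hr2.symm.trans he4)
  subst hc ht1 ht2 ht3
  simp [List.isPrefixOf] at h2

-- same for '&amp;' through the first two replaces
theorem no_amp (c : Char) (t : List Char)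
    (h3 : (['&', 'a', 'm', 'p', ';'] : List Char).isPrefixOf (c :: t) = false) :
    (['&', 'a', 'm', 'p', ';'] : List Char).isPrefixOf
      (c :: pvRl '&' ['l', 't', ';'] '<' (pvRl '&' ['g', 't', ';'] '>' t)) = false := by
  by_contra hne
  rw [Bool.not_eq_false, List.isPrefixOf_iff_prefix, List.cons_prefix_iff] at hne
  obtain ⟨l1, he1, hp1⟩ := hne
  injection he1 with hc he1'
  subst he1'
  obtain ⟨l2, he2, hp2⟩ := List.cons_prefix_iff.mp hp1
  obtain ⟨t1, ht1, hr1⟩ := pvRl2_cons_inv _ (by decide) (by decide) he2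
  obtain ⟨l3, he3, hp3⟩ := List.cons_prefix_iff.mp hp2
  obtain ⟨t2, ht2, hr2⟩ := pvRl2_cons_inv _ (by decide) (by decide) (hr1.symm.trans he3)
  obtain ⟨l4, he4, hp4⟩ := List.cons_prefix_iff.mp hp3
  obtain ⟨t3, ht3, hr3⟩ := pvRl2_cons_inv _ (by decide) (by decide) (hr2.symm.trans he4)
  obtain ⟨l5, he5, _⟩ := List.cons_prefix_iff.mp hp4
  obtain ⟨t4, ht4, _⟩ := pvRl2_cons_inv _ (by decide) (by decide) (hr3.symm.trans he5)
  subst hc ht1 ht2 ht3 ht4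
  simp [List.isPrefixOf] at h3

-- the chain of the three replaces equals the single scan
theorem chain_eq_scan : ∀ (cs : List Char),
    pvRl '&' ['a', 'm', 'p', ';'] '&'
      (pvRl '&' ['l', 't', ';'] '<'
        (pvRl '&' ['g', 't', ';'] '>' cs)) = pvScan cs := by
  suffices h : ∀ (n : Nat) (cs : List Char), cs.length ≤ n →
      pvRl '&' ['a', 'm', 'p', ';'] '&'
        (pvRl '&' ['l', 't', ';'] '<'
          (pvRl '&' ['g', 't', ';'] '>' cs)) = pvScan cs from
    fun cs => h cs.length cs le_rfl
  intro n
  induction n with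
  | zero =>
    intro cs h
    rw [List.length_eq_zero_iff.mp (Nat.le_zero.mp h)]
    simp [pvRl, pvScan]
  | succ n ih =>
    intro cs hlen
    by_cases h1 : (['&', 'g', 't', ';'] : List Char).isPrefixOf cs
    · obtain ⟨u, hu⟩ := List.isPrefixOf_iff_prefix.mp h1
      subst hu
      simp only [List.cons_append, List.nil_append] at h1 ⊢
      rw [pvRl_yes '>' h1]
      simp only [List.length_cons, List.drop_succ_cons, List.length_nil, List.drop_zero]
      rw [pvRl_no '<' (by simp [List.isPrefixOf]), pvRl_no '&' (by simp [List.isPrefixOf])]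
      rw [ih u (by simp at hlen; omega)]
      rw [pvScan]
      simp [List.isPrefixOf]
    · by_cases h2 : (['&', 'l', 't', ';'] : List Char).isPrefixOf cs
      · obtain ⟨u, hu⟩ := List.isPrefixOf_iff_prefix.mp h2
        subst hu
        simp only [List.cons_append, List.nil_append] at h1 h2 ⊢
        rw [pvRl_no '>' (by simp [List.isPrefixOf]), pvRl_no '>' (by simp [List.isPrefixOf]),
          pvRl_no '>' (by simp [List.isPrefixOf]), pvRl_no '>' (by simp [List.isPrefixOf])]
        rw [pvRl_yes '<' (by simp [List.isPrefixOf])]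
        simp only [List.length_cons, List.drop_succ_cons, List.length_nil, List.drop_zero]
        rw [pvRl_no '&' (by simp [List.isPrefixOf])]
        rw [ih u (by simp at hlen; omega)]
        rw [pvScan]
        simp [List.isPrefixOf]
      · by_cases h3 : (['&', 'a', 'm', 'p', ';'] : List Char).isPrefixOf cs
        · obtain ⟨u, hu⟩ := List.isPrefixOf_iff_prefix.mp h3
          subst hu
          simp only [List.cons_append, List.nil_append] at h1 h2 h3 ⊢
          rw [pvRl_no '>' (by simp [List.isPrefixOf]), pvRl_no '>' (by simp [List.isPrefixOf]),
            pvRl_no '>' (by simp [List.isPrefixOf]), pvRl_no '>' (by simp [List.isPrefixOf]),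
            pvRl_no '>' (by simp [List.isPrefixOf])]
          rw [pvRl_no '<' (by simp [List.isPrefixOf]), pvRl_no '<' (by simp [List.isPrefixOf]),
            pvRl_no '<' (by simp [List.isPrefixOf]), pvRl_no '<' (by simp [List.isPrefixOf]),
            pvRl_no '<' (by simp [List.isPrefixOf])]
          rw [pvRl_yes '&' (by simp [List.isPrefixOf])]
          simp only [List.length_cons, List.drop_succ_cons, List.length_nil, List.drop_zero]
          rw [ih u (by simp at hlen; omega)]
          rw [pvScan]
          simp [List.isPrefixOf]
        · cases cs with
          | nil => simp [pvRl, pvScan]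
          | cons c t =>
            rw [pvRl_no '>' (Bool.eq_false_iff.mpr h1)]
            rw [pvRl_no '<' (no_lt c t (Bool.eq_false_iff.mpr h2))]
            rw [pvRl_no '&' (no_amp c t (Bool.eq_false_iff.mpr h3))]
            rw [ih t (by simp at hlen; omega)]
            rw [pvScan]
            rw [if_neg h1, if_neg h2, if_neg h3]

theorem prefix_split {p a b : List Char} {c : Char} (h : p <+: a ++ c :: b) (hc : c ∉ p) :
    p <+: a := by
  induction p generalizing a with
  | nil => exact List.nil_prefix
  | cons d p' ih =>
    obtain ⟨l', hl, hp⟩ := List.cons_prefix_iff.mp h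
    cases a with
    | nil =>
      rw [List.nil_append] at hl
      injection hl with h1 _
      exact absurd (by rw [h1]; exact List.mem_cons_self) hc
    | cons e a' =>
      rw [List.cons_append] at hl
      injection hl with h1 h2
      subst h2
      rw [List.cons_prefix_iff]
      exact ⟨a', by rw [h1], ih hp (fun hm => hc (List.mem_cons_of_mem _ hm))⟩

theorem pvScan_gt (u : List Char) : pvScan ('&' :: 'g' :: 't' :: ';' :: u) = '>' :: pvScan u := by
  rw [pvScan]
  simp [List.isPrefixOf]

theorem pvScan_lt (u : List Char) : pvScan ('&' :: 'l' :: 't' :: ';' :: u) = '<' :: pvScan u := by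
  rw [pvScan]
  simp [List.isPrefixOf]

theorem pvScan_amp (u : List Char) : pvScan ('&' :: 'a' :: 'm' :: 'p' :: ';' :: u) = '&' :: pvScan u := by
  rw [pvScan]
  simp [List.isPrefixOf]

theorem pvScan_no {c : Char} {t : List Char}
    (h1 : ¬(['&', 'g', 't', ';'] : List Char).isPrefixOf (c :: t) = true)
    (h2 : ¬(['&', 'l', 't', ';'] : List Char).isPrefixOf (c :: t) = true)
    (h3 : ¬(['&', 'a', 'm', 'p', ';'] : List Char).isPrefixOf (c :: t) = true) :
    pvScan (c :: t) = c :: pvScan t := by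
  rw [pvScan, if_neg h1, if_neg h2, if_neg h3]

theorem scan_append_newline : ∀ (a b : List Char),
    pvScan (a ++ '\n' :: b) = pvScan a ++ '\n' :: pvScan b := by
  suffices h : ∀ (n : Nat) (a b : List Char), a.length ≤ n →
      pvScan (a ++ '\n' :: b) = pvScan a ++ '\n' :: pvScan b from
    fun a b => h a.length a b le_rfl
  intro n
  induction n with
  | zero =>
    intro a b h
    rw [List.length_eq_zero_iff.mp (Nat.le_zero.mp h)]
    rw [List.nil_append, pvScan_no (by simp [List.isPrefixOf]) (by simp [List.isPrefixOf])
      (by simp [List.isPrefixOf])]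
    simp [pvScan]
  | succ n ih =>
    intro a b hlen
    cases a with
    | nil =>
      rw [List.nil_append, pvScan_no (by simp [List.isPrefixOf]) (by simp [List.isPrefixOf])
        (by simp [List.isPrefixOf])]
      simp [pvScan]
    | cons c t =>
      have ext : ∀ p : List Char, p.isPrefixOf (c :: t) = true →
          p.isPrefixOf (c :: t ++ '\n' :: b) = true := fun p hp =>
        List.isPrefixOf_iff_prefix.mpr
          ((List.isPrefixOf_iff_prefix.mp hp).trans (List.prefix_append _ _))
      by_cases h1 : (['&', 'g', 't', ';'] : List Char).isPrefixOf (c :: t ++ '\n' :: b)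
      · obtain ⟨u, hu⟩ := prefix_split (List.isPrefixOf_iff_prefix.mp h1) (by decide)
        simp only [List.cons_append, List.nil_append] at hu
        rw [← hu] at hlen ⊢
        simp only [List.cons_append]
        rw [pvScan_gt, pvScan_gt, ih u b (by simp at hlen; omega)]
        simp
      · by_cases h2 : (['&', 'l', 't', ';'] : List Char).isPrefixOf (c :: t ++ '\n' :: b)
        · obtain ⟨u, hu⟩ := prefix_split (List.isPrefixOf_iff_prefix.mp h2) (by decide)
          simp only [List.cons_append, List.nil_append] at hu
          rw [← hu] at hlen ⊢
          simp only [List.cons_append]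
          rw [pvScan_lt, pvScan_lt, ih u b (by simp at hlen; omega)]
          simp
        · by_cases h3 : (['&', 'a', 'm', 'p', ';'] : List Char).isPrefixOf (c :: t ++ '\n' :: b)
          · obtain ⟨u, hu⟩ := prefix_split (List.isPrefixOf_iff_prefix.mp h3) (by decide)
            simp only [List.cons_append, List.nil_append] at hu
            rw [← hu] at hlen ⊢
            simp only [List.cons_append]
            rw [pvScan_amp, pvScan_amp, ih u b (by simp at hlen; omega)]
            simp
          · have e1 : pvScan (c :: (t ++ '\n' :: b)) = c :: pvScan (t ++ '\n' :: b) :=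
              pvScan_no h1 h2 h3
            rw [List.cons_append, e1,
              pvScan_no (fun hh => h1 (ext _ hh)) (fun hh => h2 (ext _ hh))
                (fun hh => h3 (ext _ hh)),
              ih t b (by simp at hlen; omega)]
            simp

theorem scan_join : ∀ (parts : List (List Char)),
    pvScan (PySem.Chars.join ['\n'] parts) = PySem.Chars.join ['\n'] (parts.map pvScan) := by
  intro parts
  induction parts with
  | nil => simp [PySem.Chars.join_nil, pvScan]
  | cons x xs ih =>
    cases xs with
    | nil => simp [PySem.Chars.join_singleton]
    | cons y ys =>
      have e : x ++ ['\n'] ++ PySem.Chars.join ['\n'] (y :: ys)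
          = x ++ '\n' :: PySem.Chars.join ['\n'] (y :: ys) := by simp
      rw [PySem.Chars.join_cons_cons, e, scan_append_newline, ih]
      simp [PySem.Chars.join_cons_cons]

theorem strip_filter_eq (x : List Char) :
    (!(PySem.Chars.stripChars x [' ', '\t', '\n', '\r']).isEmpty)
      = x.any (fun ch => !([' ', '\t', '\n', '\r'].contains ch)) := by
  have key : (PySem.Chars.stripChars x [' ', '\t', '\n', '\r'] = [])
      ↔ ∀ c ∈ x, ([' ', '\t', '\n', '\r'] : List Char).contains c = true := by
    unfold PySem.Chars.stripChars
    rw [List.reverse_eq_nil_iff, List.dropWhile_eq_nil_iff]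
    constructor
    · intro h c hc
      rw [← List.takeWhile_append_dropWhile
        (p := fun c => ([' ', '\t', '\n', '\r'] : List Char).contains c) (l := x)] at hc
      rcases List.mem_append.mp hc with h1 | h1
      · exact List.mem_takeWhile_imp h1
      · exact h c (List.mem_reverse.mpr h1)
    · intro h c hc
      exact h c ((List.dropWhile_sublist _).subset (List.mem_reverse.mp hc))
  by_cases hall : ∀ c ∈ x, ([' ', '\t', '\n', '\r'] : List Char).contains c = true
  · rw [key.mpr hall]
    symm
    simp only [List.isEmpty_nil, Bool.not_true, List.any_eq_false]
    intro c hc a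
    exact absurd (hall c hc) (by simpa using a)
  · have h1 : PySem.Chars.stripChars x [' ', '\t', '\n', '\r'] ≠ [] := fun he => hall (key.mp he)
    rw [not_forall] at hall
    obtain ⟨c, hall⟩ := hall
    rw [Classical.not_imp] at hall
    obtain ⟨hc, hnc⟩ := hall
    rw [Bool.eq_iff_iff]
    simp only [Bool.not_eq_true', List.isEmpty_eq_false_iff, ne_eq, List.any_eq_true]
    constructor
    · intro _
      exact ⟨c, hc, by simpa [not_or] using hnc⟩
    · intro _
      exact h1

-- ===== VERDICT (by name: the statement is the Claim_ definition above) =====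
theorem unescape_chameleon_output_spec : Claim_equal_unescape_chameleon_output := by
  intro s _
  unfold Spec_unescape_chameleon_output unescape_chameleon_output unescape_chameleon_output_alt
  simp only [join_splitOn_eq_rl, chain_eq_scan]
  have hf : (PySem.Chars.splitOn s.toList ['\n']).filter
      (fun x => !(PySem.Chars.stripChars x [' ', '\t', '\n', '\r']).isEmpty)
      = (PySem.Chars.splitOn s.toList ['\n']).filter
        (fun line => line.any (fun ch => !([' ', '\t', '\n', '\r'].contains ch))) := by
    exact List.filter_congr (fun x _ => strip_filter_eq x)
  rw [hf, scan_join]
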